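-- pv_equiv track=rewrite | github.com/ryancdotorg/sha2sum | scripts/sha2_const.py | islast
-- ===== SOURCE A (Python) =====
-- def islast(iterable):
--     tup = lambda flag, val: (flag,) + val if isinstance(val, tuple) else (flag, val)
--
--     iterator = iter(iterable)
--     curr = Unset = object()
--     try:
--         curr = next(iterator)
--         while True:
--             ahead = next(iterator)
--             yield tup(False, curr)
--             curr = ahead
--     except StopIteration:
--         if curr is not Unset:
--             yield tup(True, curr)
-- ===== SOURCE B (Python) =====
-- def islast(iterable):
--     tup = lambda flag, val: (flag,) + val if isinstance(val, tuple) else (flag, val)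
--     items = list(iterable)
--     for i, v in enumerate(items):
--         yield tup(i == len(items) - 1, v)
-- ===== Notes on version B (the rewrite author's own statement) =====
-- stated objective: simpler
-- what changed: Replaces the peek-ahead streaming state machine (one-element lookahead buffer driven by StopIteration) with materializing the input into a list and a single positional enumerate pass that compares each index against len-1.
import Mathlib
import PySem

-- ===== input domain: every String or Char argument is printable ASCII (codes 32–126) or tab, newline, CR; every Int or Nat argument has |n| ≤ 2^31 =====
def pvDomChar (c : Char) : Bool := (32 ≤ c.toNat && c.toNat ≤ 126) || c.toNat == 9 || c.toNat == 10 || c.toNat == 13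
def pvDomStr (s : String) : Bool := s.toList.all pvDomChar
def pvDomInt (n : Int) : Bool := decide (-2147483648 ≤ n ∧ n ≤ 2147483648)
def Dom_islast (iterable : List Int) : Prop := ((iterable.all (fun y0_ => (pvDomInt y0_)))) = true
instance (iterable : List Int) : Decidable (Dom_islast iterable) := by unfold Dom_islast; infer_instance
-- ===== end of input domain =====

-- B replaces A's one-element-lookahead streaming state machine by materializing the list and
-- one enumerate pass comparing each index to len-1 (objective: simpler).
-- Note: A is a generator working lazily on any iterable; on a finite list the yielded values,
-- which this file is about, are identical.

-- ===== PORT A =====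
-- the while-loop with the one-element lookahead buffer: 'curr' held, next peeked
def islastLoop (curr : Int) (rest : List Int) : List (Bool × Int) :=
  match rest with
  | [] => [(true, curr)]                         -- StopIteration with curr set: yield (True, curr)
  | ahead :: rest' => (false, curr) :: islastLoop ahead rest'

def islast (iterable : List Int) : List (Bool × Int) :=
  match iterable with
  | [] => []                                     -- first next() raises: curr is Unset, nothing yielded
  | c :: r => islastLoop c r

-- ===== PORT B =====
def islast_alt (iterable : List Int) : List (Bool × Int) :=
  (PySem.List.enumerate iterable 0).map
    (fun p => (p.1 == (iterable.length : Int) - 1, p.2))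

-- ===== PRECONDITION & SPEC =====
def Spec_islast (iterable : List Int) (out : List (Bool × Int)) : Prop := out = islast_alt iterable
instance (iterable : List Int) (out : List (Bool × Int)) : Decidable (Spec_islast iterable out) := by unfold Spec_islast; infer_instance

-- ===== CLAIM (what is proved, stated in full; the proofs are below) =====
def Claim_equal_islast : Prop := ∀ (iterable : List Int), Dom_islast iterable → Spec_islast iterable (islast iterable)

-- ===== LEMMAS AND PROOFS =====
theorem islastLoop_eq_enumerate (rest : List Int) : ∀ (curr : Int) (s : Int),
    islastLoop curr rest =
      (PySem.List.enumerate (curr :: rest) s).map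
        (fun p => (p.1 == s + rest.length, p.2)) := by
  induction rest with
  | nil =>
    intro curr s
    simp [islastLoop, PySem.List.enumerate_cons, PySem.List.enumerate_nil]
  | cons a rest ih =>
    intro curr s
    have h1 : (s == s + ((a :: rest).length : Int)) = false := by
      simp; omega
    have hL : s + 1 + (rest.length : Int) = s + ((a :: rest).length : Int) := by
      push_cast [List.length_cons]; ring
    show (false, curr) :: islastLoop a rest = _
    rw [ih a (s + 1), hL, PySem.List.enumerate_cons]
    simp
    omega

-- ===== VERDICT (by name: the statement is the Claim_ definition above) =====
theorem islast_spec : Claim_equal_islast := by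
  intro iterable _
  unfold Spec_islast
  cases iterable with
  | nil => simp [islast, islast_alt, PySem.List.enumerate_nil]
  | cons c r =>
    show islastLoop c r = islast_alt (c :: r)
    unfold islast_alt
    rw [islastLoop_eq_enumerate r c 0]
    have hL : (0 : Int) + (r.length : Int) = ((c :: r).length : Int) - 1 := by
      push_cast [List.length_cons]; ring
    rw [hL]
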